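-- pv_equiv track=rewrite | github.com/alessandroliafook/P1 | unidade6/quantos_comeram/quantos_comeram.py | quantos_comeram
-- ===== SOURCE A (Python) =====
-- def quantos_comeram(n, fila):
-- 	servidas = 0
-- 	for pedido in fila:
-- 		if n - pedido >= 0:
-- 			n = n - pedido
-- 			servidas += pedido
-- 		else:
-- 			break
-- 	return servidas
-- ===== SOURCE B (Python) =====
-- def quantos_comeram(n, fila):
--     # Prefix-sum formulation: build the running totals of the orders, then
--     # keep the last running total that still fits the fixed capacity n,
--     # stopping at the first one that overflows.
--     prefix = []
--     total = 0
--     for p in fila: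
--         total += p
--         prefix.append(total)
--     served = 0
--     for s in prefix:
--         if s > n:
--             break
--         served = s
--     return served
-- ===== Notes on version B (the rewrite author's own statement) =====
-- stated objective: alternative
-- what changed: Replaces A's single capacity-decrement loop with a two-pass prefix-sum formulation: first build the list of running totals of the orders, then keep the last total that fits the fixed original capacity, stopping at the first overflow.
import Mathlib
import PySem

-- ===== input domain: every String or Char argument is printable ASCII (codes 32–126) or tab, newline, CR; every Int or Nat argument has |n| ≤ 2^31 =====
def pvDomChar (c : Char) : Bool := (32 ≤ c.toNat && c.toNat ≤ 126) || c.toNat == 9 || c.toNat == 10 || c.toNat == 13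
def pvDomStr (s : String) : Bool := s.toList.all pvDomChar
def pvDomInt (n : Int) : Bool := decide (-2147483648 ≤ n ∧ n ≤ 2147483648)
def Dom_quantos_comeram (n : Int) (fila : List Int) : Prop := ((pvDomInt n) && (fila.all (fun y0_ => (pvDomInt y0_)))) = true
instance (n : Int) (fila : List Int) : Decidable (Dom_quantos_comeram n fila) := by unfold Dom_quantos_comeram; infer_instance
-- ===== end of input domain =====

-- B builds the list of running prefix totals first, then keeps the last total
-- that fits the fixed capacity; A decrements the capacity in a single loop.

-- ===== PORT A =====
-- A's for-loop with break: state (n, servidas), structural recursion on fila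
def quantosLoopA : Int → Int → List Int → Int
  | _, servidas, [] => servidas
  | n, servidas, pedido :: rest =>
      if n - pedido ≥ 0 then quantosLoopA (n - pedido) (servidas + pedido) rest
      else servidas

def quantos_comeram (n : Int) (fila : List Int) : Int := quantosLoopA n 0 fila

-- ===== PORT B =====
-- Source B's first loop: build the running totals (state = (prefix, total))
def qcPrefix (fila : List Int) : List Int :=
  (fila.foldl (fun (st : List Int × Int) p => (st.1 ++ [st.2 + p], st.2 + p)) ([], 0)).1

-- Source B's second loop with break: served = last total ≤ n before the first overflow
def qcServe (n : Int) : Int → List Int → Int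
  | served, [] => served
  | served, s :: rest => if s > n then served else qcServe n s rest

def quantos_comeram_alt (n : Int) (fila : List Int) : Int :=
  qcServe n 0 (qcPrefix fila)

-- ===== PRECONDITION & SPEC =====
def Spec_quantos_comeram (n : Int) (fila : List Int) (out : Int) : Prop := out = quantos_comeram_alt n fila
instance (n : Int) (fila : List Int) (out : Int) : Decidable (Spec_quantos_comeram n fila out) := by unfold Spec_quantos_comeram; infer_instance

-- ===== CLAIM (what is proved, stated in full; the proofs are below) =====
def Claim_equal_quantos_comeram : Prop := ∀ (n : Int) (fila : List Int), Dom_quantos_comeram n fila → Spec_quantos_comeram n fila (quantos_comeram n fila)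

-- ===== LEMMAS AND PROOFS =====

-- the running totals of l starting from accumulated sum acc
def qcPrefixes : List Int → Int → List Int
  | [], _ => []
  | p :: r, acc => (acc + p) :: qcPrefixes r (acc + p)

theorem qcPrefix_foldl (l : List Int) :
    ∀ (pr : List Int) (acc : Int),
      (l.foldl (fun (st : List Int × Int) p => (st.1 ++ [st.2 + p], st.2 + p)) (pr, acc)).1
        = pr ++ qcPrefixes l acc := by
  induction l with
  | nil => intro pr acc; simp [qcPrefixes]
  | cons p r ih =>
      intro pr acc
      simp only [List.foldl, qcPrefixes]
      rw [ih]
      simp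

theorem qcServe_eq_loopA (n : Int) :
    ∀ (l : List Int) (acc : Int),
      qcServe n acc (qcPrefixes l acc) = quantosLoopA (n - acc) acc l := by
  intro l
  induction l with
  | nil => intro acc; simp [qcPrefixes, qcServe, quantosLoopA]
  | cons p r ih =>
      intro acc
      simp only [qcPrefixes, qcServe, quantosLoopA]
      by_cases hc : acc + p > n
      · rw [if_pos hc, if_neg (by omega : ¬ n - acc - p ≥ 0)]
      · rw [if_neg hc, if_pos (by omega : n - acc - p ≥ 0), ih]
        ring_nf

-- ===== VERDICT (by name: the statement is the Claim_ definition above) =====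
theorem quantos_comeram_spec : Claim_equal_quantos_comeram := by
  intro n fila _
  unfold Spec_quantos_comeram quantos_comeram quantos_comeram_alt qcPrefix
  rw [qcPrefix_foldl, List.nil_append, qcServe_eq_loopA]
  simp
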